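-- pv_equiv track=rewrite | github.com/SAG145/Project-Euler | PEP146 - Investigating a Prime Pattern.py | such_integers
-- ===== SOURCE A (Python) =====
-- import math
--
-- def all_primes_below_n(n):
--     primes_bool = [False, False] + [True] * (n - 2)
--     for k in range(2, int(math.sqrt(n)) + 1):
--         if primes_bool[k]:
--             for l in range(2*k,n,k):
--                 primes_bool[l] = False
--     primes_list = []
--     for k in range(n):
--         if primes_bool[k]:
--             primes_list.append(k)
--     return primes_list
--
-- def prime_pattern(n,primes,steps):
--     not_allowed = [15,21,25]
--     for p in primes:
--         if p > n + 2:
--             return len(not_allowed) == 0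
--         m = ((n % p)**2) % p
--         for s in steps:
--             if (m + s) % p == 0:
--                 return False
--         for k in not_allowed:
--             if (m + k) % p == 0:
--                 not_allowed.remove(k)
--
-- def such_integers(maxi):
--     primes = all_primes_below_n(maxi)
--     steps = [1,3,7,9,13,27]
--     sum1 = 0
--     for a in range(4,maxi,42):
--         if prime_pattern(a,primes,steps):
--             sum1 += a
--     for b in range(10,maxi,42):
--         if prime_pattern(b,primes,steps):
--             sum1 += b
--     for c in range(32,maxi,42):
--         if prime_pattern(c,primes,steps):
--             sum1 += c
--     for d in range(38,maxi,42):
--         if prime_pattern(d,primes,steps):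
--             sum1 += d
--     return sum1
-- ===== SOURCE B (Python) =====
-- import math
--
-- _STEPS = (1, 3, 7, 9, 13, 27)
--
--
-- def _passes(n, primes):
--     # stateless test: n*n + s must keep clear of every prime up to n + 2 for the
--     # step offsets, while each of n*n + 15, n*n + 21, n*n + 25 must have a
--     # witnessing prime factor in that range; a prime beyond n + 2 must exist
--     limit = n + 2
--     i = 0
--     while i < len(primes) and primes[i] <= limit:
--         p = primes[i]
--         if any((n * n + s) % p == 0 for s in _STEPS):
--             return False
--         i += 1
--     if i == len(primes):
--         return False
--     head = primes[:i]
--     return all(any((n * n + k) % p == 0 for p in head) for k in (15, 21, 25))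
--
--
-- def such_integers(maxi):
--     sieve = [True] * maxi
--     for k in range(2, math.isqrt(maxi) + 1):
--         if sieve[k]:
--             for m in range(2 * k, maxi, k):
--                 sieve[m] = False
--     primes = [k for k in range(2, maxi) if sieve[k]]
--     return sum(n for start in (4, 10, 32, 38)
--                  for n in range(start, maxi, 42)
--                  if _passes(n, primes))
-- ===== Notes on version B (the rewrite author's own statement) =====
-- stated objective: simpler
-- what changed: The stateful scan that mutates a not_allowed list while iterating over it is replaced by a stateless predicate: one pass rejecting any prime within the scanned range dividing a step-shifted square, then an all/any existence check that each of the three required composite offsets has a witnessing prime in that range (equivalent because a single prime can kill two of the required offsets only if it divides one of their small differences, which the candidates' residues make harmless); the four accumulator loops become one generator sum. …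
import Mathlib
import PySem

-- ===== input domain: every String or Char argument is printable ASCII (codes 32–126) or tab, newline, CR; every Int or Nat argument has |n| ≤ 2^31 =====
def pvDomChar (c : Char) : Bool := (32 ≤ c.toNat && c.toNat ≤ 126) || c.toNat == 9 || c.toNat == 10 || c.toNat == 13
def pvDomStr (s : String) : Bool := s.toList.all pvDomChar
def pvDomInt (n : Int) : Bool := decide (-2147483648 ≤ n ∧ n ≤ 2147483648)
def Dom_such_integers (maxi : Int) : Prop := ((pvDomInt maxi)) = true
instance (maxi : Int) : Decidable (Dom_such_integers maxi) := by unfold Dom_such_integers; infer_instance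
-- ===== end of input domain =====

-- B replaces A's stateful scan (which mutates the not_allowed list while iterating over it)
-- by a stateless predicate — a bisect cut, a steps check, and an all/any witness check —
-- for a simpler, declarative candidate test; the sum value is proved identical.

-- ===== PORT A =====

-- termination helper for the port of 'for k in not_allowed: … not_allowed.remove(k)'
theorem pvRemoveGetDLen (xs : List Int) (v : Int) :
    ((PySem.List.remove? xs v).getD xs).length ≤ xs.length := by
  induction xs with
  | nil => simp [PySem.List.remove?]
  | cons x xs ih =>
    by_cases hxv : x = v
    · subst hxv
      rw [PySem.List.remove?_cons_self]
      simp
    · rw [PySem.List.remove?_cons_of_ne xs hxv]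
      cases h : PySem.List.remove? xs v with
      | none => simp
      | some l => simpa [h] using (by simpa [h] using ih)

-- int(math.sqrt(n)) — equal to math.isqrt(n) = Nat.sqrt on the whole domain 0 ≤ n ≤ 2^31
def pySqrtInt (n : Int) : Int := (Nat.sqrt n.toNat : Int)

-- 'for k in not_allowed: if (m+k)%p == 0: not_allowed.remove(k)' — Python's for advances its
-- index after a removal, so the element sliding into the freed slot is skipped
def aRemoveLoop (m p : Int) (na : List Int) (i : Nat) : List Int :=
  if h : i < na.length then
    if PySem.Int.mod (m + na[i]) p == 0 then
      aRemoveLoop m p ((PySem.List.remove? na na[i]).getD na) (i + 1)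
    else
      aRemoveLoop m p na (i + 1)
  else na
termination_by na.length - i
decreasing_by
  · have := pvRemoveGetDLen na na[i]; omega
  · omega

def aPatGo (n : Int) (steps : List Int) : List Int → List Int → Option Bool
  | [], _ => none
  | p :: ps, na =>
    if p > n + 2 then some (decide (na.length = 0))
    else
      let m := PySem.Int.mod ((PySem.Int.mod n p) ^ 2) p
      if steps.any (fun s => PySem.Int.mod (m + s) p == 0) then some false
      else aPatGo n steps ps (aRemoveLoop m p na 0)

def prime_pattern (n : Int) (primes steps : List Int) : Option Bool :=
  aPatGo n steps primes [15, 21, 25]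

def all_primes_below_n (n : Int) : List Int :=
  -- the Python list of booleans is ported as Array Bool (mutated in place, like the Python list);
  -- every index Python reads or writes is in range, so getD/setIfInBounds are exact here
  let primesBool0 : Array Bool := ([false, false] ++ List.replicate (n - 2).toNat true).toArray
  let primesBool :=
    (PySem.List.pyRange 2 (pySqrtInt n + 1) 1).foldl
      (fun bs k =>
        if bs.getD k.toNat false then
          (PySem.List.pyRange (2 * k) n k).foldl (fun b l => b.setIfInBounds l.toNat false) bs
        else bs)
      primesBool0
  (PySem.List.pyRange 0 n 1).foldl
    (fun acc k => if primesBool.getD k.toNat false then acc ++ [k] else acc) []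

-- Python truthiness of the value of prime_pattern (None / False / True)
def pyTruthy : Option Bool → Bool
  | none => false
  | some b => b

def such_integers (maxi : Int) : Int :=
  let primes := all_primes_below_n maxi
  let steps : List Int := [1, 3, 7, 9, 13, 27]
  let sum1 : Int := 0
  let sum1 := (PySem.List.pyRange 4 maxi 42).foldl
    (fun acc a => if pyTruthy (prime_pattern a primes steps) then acc + a else acc) sum1
  let sum1 := (PySem.List.pyRange 10 maxi 42).foldl
    (fun acc b => if pyTruthy (prime_pattern b primes steps) then acc + b else acc) sum1
  let sum1 := (PySem.List.pyRange 32 maxi 42).foldl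
    (fun acc c => if pyTruthy (prime_pattern c primes steps) then acc + c else acc) sum1
  let sum1 := (PySem.List.pyRange 38 maxi 42).foldl
    (fun acc d => if pyTruthy (prime_pattern d primes steps) then acc + d else acc) sum1
  sum1

-- ===== PORT B =====

def bSteps : List Int := [1, 3, 7, 9, 13, 27]

-- the while loop of _passes: walk the primes not exceeding the limit; none = the early 'return False'
def bScan (n : Int) (primes : List Int) (i : Nat) : Option Nat :=
  if h : i < primes.length then
    if primes[i] ≤ n + 2 then
      if bSteps.any (fun s => PySem.Int.mod (n * n + s) primes[i] == 0) then none
      else bScan n primes (i + 1)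
    else some i
  else some i
termination_by primes.length - i

-- stateless candidate test of Source B: scan loop, then an all/any witness check
def bPasses (n : Int) (primes : List Int) : Bool :=
  match bScan n primes 0 with
  | none => false
  | some i =>
    if i == primes.length then false
    else
      let head := PySem.List.slice primes (some 0) (some (i : Int))
      ([15, 21, 25] : List Int).all
        (fun k => head.any (fun p => PySem.Int.mod (n * n + k) p == 0))

def bPrimesBelow (maxi : Int) : List Int :=
  -- Source B's list of booleans as Array Bool; all touched indices are in range
  let sieve0 : Array Bool := (List.replicate maxi.toNat true).toArray
  let sieve :=
    (PySem.List.pyRange 2 ((Nat.sqrt maxi.toNat : Int) + 1) 1).foldl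
      (fun bs k =>
        if bs.getD k.toNat false then
          (PySem.List.pyRange (2 * k) maxi k).foldl (fun b m => b.setIfInBounds m.toNat false) bs
        else bs)
      sieve0
  (PySem.List.pyRange 2 maxi 1).filter (fun k => sieve.getD k.toNat false)

def such_integers_alt (maxi : Int) : Int :=
  let primes := bPrimesBelow maxi
  ((([(4 : Int), 10, 32, 38].flatMap (fun s => PySem.List.pyRange s maxi 42)).filter
      (fun n => bPasses n primes))).sum

-- ===== PRECONDITION & SPEC =====
-- Pre_ excludes negative maxi, on which Python A raises ValueError (math.sqrt of a negative).
def Pre_such_integers (maxi : Int) : Prop := 0 ≤ maxi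
instance (maxi : Int) : Decidable (Pre_such_integers maxi) := by unfold Pre_such_integers; infer_instance
def pvWitness_such_integers : Int := (50)

def Spec_such_integers (maxi : Int) (out : Int) : Prop := out = such_integers_alt maxi
instance (maxi : Int) (out : Int) : Decidable (Spec_such_integers maxi out) := by unfold Spec_such_integers; infer_instance

-- ===== CLAIM (what is proved, stated in full; the proofs are below) =====
def Claim_equal_such_integers : Prop := ∀ (maxi : Int), Dom_such_integers maxi → Pre_such_integers maxi → Spec_such_integers maxi (such_integers maxi)

-- ===== LEMMAS AND PROOFS =====

-- one array write, seen through getD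
theorem pvSetArr (bs : Array Bool) (j i : Nat) :
    (bs.setIfInBounds j false).getD i false = (bs.getD i false && !(decide (i = j))) := by
  rw [Array.getD_eq_getD_getElem?, Array.getD_eq_getD_getElem?, Array.getElem?_setIfInBounds]
  by_cases hij : j = i
  · subst hij
    by_cases hlt : j < bs.size
    · simp [hlt]
    · rw [if_pos rfl, if_neg hlt, Array.getElem?_eq_none (by omega : bs.size ≤ j)]
      simp
  · simp [hij, Ne.symm hij]

-- getD after the marking fold (a list of nonnegative indices written to false)
theorem pvMarkArr (L : List Int) (hL : ∀ l ∈ L, 0 ≤ l) (bs : Array Bool) (i : Nat) :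
    (L.foldl (fun b l => b.setIfInBounds l.toNat false) bs).getD i false
      = (bs.getD i false && !(decide ((i : Int) ∈ L))) := by
  induction L generalizing bs with
  | nil => simp
  | cons l L ih =>
    have hl : 0 ≤ l := hL l (by simp)
    rw [List.foldl_cons, ih (fun x hx => hL x (by simp [hx])), pvSetArr]
    have hiff : ((i : Int) = l) ↔ (i = l.toNat) := by omega
    by_cases hi : i = l.toNat
    · rw [decide_eq_true hi, decide_eq_true (show (i : Int) ∈ l :: L by simp [hiff.mpr hi])]
      simp
    · have hi2 : ¬ (i : Int) = l := fun h => hi (hiff.mp h)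
      simp [hi, hi2]

-- i has a proper divisor among the already-processed sieve bases 2 ≤ d < t
def pvMarked (n t i : Int) : Prop := ∃ d : Int, 2 ≤ d ∧ d < t ∧ d ∣ i ∧ 2 * d ≤ i ∧ i < n

theorem pvMarkedTwo (n i : Int) : ¬ pvMarked n 2 i := by
  rintro ⟨d, h1, h2, -⟩; omega

theorem pvMarkedSucc (n t i : Int) (ht : 2 ≤ t) :
    pvMarked n (t + 1) i ↔ pvMarked n t i ∨ (t ∣ i ∧ 2 * t ≤ i ∧ i < n) := by
  constructor
  · rintro ⟨d, h1, h2, h3, h4, h5⟩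
    by_cases hdt : d = t
    · subst hdt; exact Or.inr ⟨h3, h4, h5⟩
    · exact Or.inl ⟨d, h1, by omega, h3, h4, h5⟩
  · rintro (⟨d, h1, h2, h3, h4, h5⟩ | ⟨h3, h4, h5⟩)
    · exact ⟨d, h1, by omega, h3, h4, h5⟩
    · exact ⟨t, ht, by omega, h3, h4, h5⟩

-- range membership for the inner marking range
theorem pvMemMark (t n x : Int) (ht : 2 ≤ t) :
    x ∈ PySem.List.pyRange (2 * t) n t ↔ (t ∣ x ∧ 2 * t ≤ x ∧ x < n) := by
  rw [PySem.List.mem_pyRange_iff_of_pos (by omega)]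
  constructor
  · rintro ⟨h1, h2, h3⟩
    refine ⟨?_, h1, h2⟩
    have := dvd_add h3 (⟨2, by ring⟩ : t ∣ 2 * t)
    simpa using this
  · rintro ⟨h1, h2, h3⟩
    exact ⟨h2, h3, dvd_sub h1 (⟨2, by ring⟩ : t ∣ 2 * t)⟩

-- the initial arrays, seen through getD
theorem pvInitA (n : Int) (i : Nat) :
    ((([false, false] ++ List.replicate (n - 2).toNat true).toArray).getD i false = true)
      ↔ (2 ≤ (i : Int) ∧ (i : Int) < n) := by
  rw [Array.getD_eq_getD_getElem?, List.getElem?_toArray]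
  match i with
  | 0 => simp
  | 1 => simp
  | (j + 2) =>
    by_cases hj : j < (n - 2).toNat
    · rw [List.getElem?_append_right (by simp)]
      simp only [List.length_cons, List.length_nil]
      rw [List.getElem?_replicate]
      simp [hj]
      omega
    · rw [List.getElem?_eq_none (by simp; omega)]
      simp
      omega

theorem pvInitB (n : Int) (i : Nat) :
    (((List.replicate n.toNat true).toArray).getD i false = true) ↔ (i : Int) < n := by
  rw [Array.getD_eq_getD_getElem?, List.getElem?_toArray, List.getElem?_replicate]
  by_cases hi : i < n.toNat <;> simp [hi] <;> omega

-- characterization of A's sieve array after processing the bases 2, …, 2+j-1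
theorem pvCharA (n : Int) :
    ∀ (j : Nat), (∀ d : Int, 2 ≤ d → d < 2 + (j : Int) → d < n) →
    ∀ i : Nat,
      (((PySem.List.pyRange 2 (2 + (j : Int)) 1).foldl
          (fun bs k =>
            if bs.getD k.toNat false then
              (PySem.List.pyRange (2 * k) n k).foldl (fun b l => b.setIfInBounds l.toNat false) bs
            else bs)
          (([false, false] ++ List.replicate (n - 2).toNat true).toArray)).getD i false = true)
        ↔ (2 ≤ (i : Int) ∧ (i : Int) < n ∧ ¬ pvMarked n (2 + (j : Int)) i) := by
  intro j
  induction j with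
  | zero =>
    intro _ i
    rw [show ((2 : Int) + ((0 : Nat) : Int)) = 2 by norm_num,
      PySem.List.pyRange_one_eq_nil (by omega), List.foldl_nil]
    rw [pvInitA]
    have := pvMarkedTwo n (i : Int)
    tauto
  | succ j ih =>
    intro hj i
    have hcast : (2 + ((j + 1 : Nat) : Int)) = (2 + (j : Int)) + 1 := by push_cast; ring
    rw [hcast, PySem.List.pyRange_one_succ_right (by omega), List.foldl_append,
      List.foldl_cons, List.foldl_nil]
    have iha := ih (fun d hd hdt => hj d hd (by push_cast; omega))
    have ht2 : (2 : Int) ≤ 2 + (j : Int) := by omega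
    have htn : 2 + (j : Int) < n := hj _ ht2 (by omega)
    have hMS := fun i => pvMarkedSucc n (2 + (j : Int)) i ht2
    by_cases hg : ((PySem.List.pyRange 2 (2 + (j : Int)) 1).foldl
        (fun bs k =>
          if bs.getD k.toNat false then
            (PySem.List.pyRange (2 * k) n k).foldl (fun b l => b.setIfInBounds l.toNat false) bs
          else bs)
        (([false, false] ++ List.replicate (n - 2).toNat true).toArray)).getD
          (2 + (j : Int)).toNat false = true
    · rw [if_pos hg]
      rw [pvMarkArr _ (fun l hl => by
          have := (pvMemMark (2 + (j : Int)) n l ht2).mp hl; omega)]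
      simp only [Bool.and_eq_true, Bool.not_eq_true', decide_eq_false_iff_not, iha i,
        pvMemMark _ n _ ht2, hMS]
      constructor
      · rintro ⟨⟨h1, h2, h3⟩, h4⟩
        exact ⟨h1, h2, fun h => h.elim h3 h4⟩
      · rintro ⟨h1, h2, h3⟩
        exact ⟨⟨h1, h2, fun h => h3 (Or.inl h)⟩, fun h => h3 (Or.inr h)⟩
    · rw [if_neg hg]
      rw [iha i]
      -- the skipped base is itself marked, so everything it would mark is already marked
      have hmk : pvMarked n (2 + (j : Int)) (2 + (j : Int)) := by
        by_contra hmk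
        exact hg ((iha (2 + (j : Int)).toNat).mpr (by
          rw [Int.toNat_of_nonneg (by omega)]
          exact ⟨ht2, htn, hmk⟩))
      obtain ⟨e, he1, he2, he3, he4, he5⟩ := hmk
      have hiff : pvMarked n (2 + (j : Int)) (i : Int) ↔ pvMarked n ((2 + (j : Int)) + 1) (i : Int) := by
        constructor
        · rintro ⟨d, h1, h2, h3, h4, h5⟩
          exact ⟨d, h1, by omega, h3, h4, h5⟩
        · intro h
          rcases (hMS (i : Int)).mp h with h | ⟨hdvd, hle, hlt⟩
          · exact h
          · exact ⟨e, he1, he2, dvd_trans he3 hdvd, by omega, hlt⟩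
      tauto

-- characterization of B's sieve array after processing the bases 2, …, 2+j-1
theorem pvCharB (n : Int) :
    ∀ (j : Nat), (∀ d : Int, 2 ≤ d → d < 2 + (j : Int) → d < n) →
    ∀ i : Nat,
      (((PySem.List.pyRange 2 (2 + (j : Int)) 1).foldl
          (fun bs k =>
            if bs.getD k.toNat false then
              (PySem.List.pyRange (2 * k) n k).foldl (fun b m => b.setIfInBounds m.toNat false) bs
            else bs)
          ((List.replicate n.toNat true).toArray)).getD i false = true)
        ↔ ((i : Int) < n ∧ ¬ pvMarked n (2 + (j : Int)) i) := by
  intro j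
  induction j with
  | zero =>
    intro _ i
    rw [show ((2 : Int) + ((0 : Nat) : Int)) = 2 by norm_num,
      PySem.List.pyRange_one_eq_nil (by omega), List.foldl_nil]
    rw [pvInitB]
    have := pvMarkedTwo n (i : Int)
    tauto
  | succ j ih =>
    intro hj i
    have hcast : (2 + ((j + 1 : Nat) : Int)) = (2 + (j : Int)) + 1 := by push_cast; ring
    rw [hcast, PySem.List.pyRange_one_succ_right (by omega), List.foldl_append,
      List.foldl_cons, List.foldl_nil]
    have iha := ih (fun d hd hdt => hj d hd (by push_cast; omega))
    have ht2 : (2 : Int) ≤ 2 + (j : Int) := by omega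
    have htn : 2 + (j : Int) < n := hj _ ht2 (by omega)
    have hMS := fun i => pvMarkedSucc n (2 + (j : Int)) i ht2
    by_cases hg : ((PySem.List.pyRange 2 (2 + (j : Int)) 1).foldl
        (fun bs k =>
          if bs.getD k.toNat false then
            (PySem.List.pyRange (2 * k) n k).foldl (fun b m => b.setIfInBounds m.toNat false) bs
          else bs)
        ((List.replicate n.toNat true).toArray)).getD (2 + (j : Int)).toNat false = true
    · rw [if_pos hg]
      rw [pvMarkArr _ (fun l hl => by
          have := (pvMemMark (2 + (j : Int)) n l ht2).mp hl; omega)]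
      simp only [Bool.and_eq_true, Bool.not_eq_true', decide_eq_false_iff_not, iha i,
        pvMemMark _ n _ ht2, hMS]
      constructor
      · rintro ⟨⟨h2, h3⟩, h4⟩
        exact ⟨h2, fun h => h.elim h3 h4⟩
      · rintro ⟨h2, h3⟩
        exact ⟨⟨h2, fun h => h3 (Or.inl h)⟩, fun h => h3 (Or.inr h)⟩
    · rw [if_neg hg]
      rw [iha i]
      -- the skipped base is itself marked, so everything it would mark is already marked
      have hmk : pvMarked n (2 + (j : Int)) (2 + (j : Int)) := by
        by_contra hmk
        exact hg ((iha (2 + (j : Int)).toNat).mpr (by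
          rw [Int.toNat_of_nonneg (by omega)]
          exact ⟨htn, hmk⟩))
      obtain ⟨e, he1, he2, he3, he4, he5⟩ := hmk
      have hiff : pvMarked n (2 + (j : Int)) (i : Int) ↔ pvMarked n ((2 + (j : Int)) + 1) (i : Int) := by
        constructor
        · rintro ⟨d, h1, h2, h3, h4, h5⟩
          exact ⟨d, h1, by omega, h3, h4, h5⟩
        · intro h
          rcases (hMS (i : Int)).mp h with h | ⟨hdvd, hle, hlt⟩
          · exact h
          · exact ⟨e, he1, he2, dvd_trans he3 hdvd, by omega, hlt⟩
      tauto

-- the two prime lists coincide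
theorem pvPrimesEq (n : Int) (hn : 0 ≤ n) : all_primes_below_n n = bPrimesBelow n := by
  unfold all_primes_below_n bPrimesBelow pySqrtInt
  dsimp only []
  rw [PySem.List.foldl_append_if_eq_filter, List.nil_append]
  set j : Nat := ((Nat.sqrt n.toNat : Int) + 1 - 2).toNat with hjdef
  have hrange : PySem.List.pyRange 2 ((Nat.sqrt n.toNat : Int) + 1) 1
      = PySem.List.pyRange 2 (2 + (j : Int)) 1 := by
    by_cases hs : 1 ≤ (Nat.sqrt n.toNat : Int)
    · have : (2 : Int) + (j : Int) = (Nat.sqrt n.toNat : Int) + 1 := by omega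
      rw [this]
    · rw [PySem.List.pyRange_one_eq_nil (by omega), PySem.List.pyRange_one_eq_nil (by omega)]
  have hdlt : ∀ d : Int, 2 ≤ d → d < 2 + (j : Int) → d < n := by
    intro d h2 hdj
    have h1 : d ≤ (Nat.sqrt n.toNat : Int) := by omega
    have hs2 : 1 < n.toNat := by
      have := Nat.sqrt_le_self n.toNat; omega
    have := Nat.sqrt_lt_self hs2
    omega
  rw [hrange]
  have hA := pvCharA n j hdlt
  have hB := pvCharB n j hdlt
  have hf01 : ∀ bs : Array Bool, bs.getD 0 false = false → bs.getD 1 false = false →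
      List.filter (fun k : Int => bs.getD k.toNat false) [(0 : Int), 1] = [] := by
    intro bs h0 h1
    simp [List.filter, h0, h1]
  by_cases h2n : 2 ≤ n
  · rw [PySem.List.pyRange_one_append 0 2 n (by omega) h2n, List.filter_append]
    have hr02 : PySem.List.pyRange 0 2 1 = [0, 1] := by decide
    rw [hr02]
    rw [hf01 _
        (Bool.eq_false_iff.mpr (fun h => absurd ((hA 0).mp h).1 (by norm_num)))
        (Bool.eq_false_iff.mpr (fun h => absurd ((hA 1).mp h).1 (by norm_num))),
      List.nil_append]
    apply List.filter_congr
    intro x hx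
    have hb := (PySem.List.mem_pyRange_one).mp hx
    have hx0 : 0 ≤ x := by omega
    have hcast : ((x.toNat : Int)) = x := Int.toNat_of_nonneg hx0
    have hA' := hA x.toNat
    have hB' := hB x.toNat
    rw [hcast] at hA' hB'
    rw [Bool.eq_iff_iff, hA', hB']
    constructor
    · rintro ⟨-, h2, h3⟩; exact ⟨h2, h3⟩
    · rintro ⟨h2, h3⟩; exact ⟨hb.1, h2, h3⟩
  · rw [PySem.List.pyRange_one_eq_nil (show n ≤ 2 by omega), List.filter_nil]
    refine List.filter_eq_nil_iff.mpr ?_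
    intro x hx
    have hb := (PySem.List.mem_pyRange_one).mp hx
    intro hcontra
    have hchar := (hA x.toNat).mp hcontra
    rw [Int.toNat_of_nonneg (by omega)] at hchar
    obtain ⟨ha, hb2, -⟩ := hchar
    omega

-- the prime list of B is strictly increasing with members ≥ 2
theorem pvPrimesSorted (n : Int) : (bPrimesBelow n).Pairwise (· < ·) := by
  unfold bPrimesBelow
  dsimp only []
  exact List.Pairwise.filter _ (PySem.List.pairwise_lt_pyRange_one 2 n)

theorem pvPrimesGe2 (n : Int) : ∀ p ∈ bPrimesBelow n, 2 ≤ p := by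
  unfold bPrimesBelow
  dsimp only []
  intro p hp
  have := List.mem_filter.mp hp
  exact ((PySem.List.mem_pyRange_one).mp this.1).1

-- 4, 6 and 10 are never in the sieve output (they are marked as multiples of 2)
theorem pvPrimesNotBad (n : Int) : ∀ p ∈ bPrimesBelow n, p ≠ 4 ∧ p ≠ 6 ∧ p ≠ 10 := by
  unfold bPrimesBelow
  dsimp only []
  intro p hp
  obtain ⟨hp1, hp2⟩ := List.mem_filter.mp hp
  have hb := (PySem.List.mem_pyRange_one).mp hp1
  set j : Nat := ((Nat.sqrt n.toNat : Int) + 1 - 2).toNat with hjdef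
  have hrange : PySem.List.pyRange 2 ((Nat.sqrt n.toNat : Int) + 1) 1
      = PySem.List.pyRange 2 (2 + (j : Int)) 1 := by
    by_cases hs : 1 ≤ (Nat.sqrt n.toNat : Int)
    · have : (2 : Int) + (j : Int) = (Nat.sqrt n.toNat : Int) + 1 := by omega
      rw [this]
    · rw [PySem.List.pyRange_one_eq_nil (by omega), PySem.List.pyRange_one_eq_nil (by omega)]
  rw [hrange] at hp2
  have hdlt : ∀ d : Int, 2 ≤ d → d < 2 + (j : Int) → d < n := by
    intro d hd2 hdj
    have h1 : d ≤ (Nat.sqrt n.toNat : Int) := by omega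
    have hs2 : 1 < n.toNat := by
      have := Nat.sqrt_le_self n.toNat; omega
    have := Nat.sqrt_lt_self hs2
    omega
  have hchar := (pvCharB n j hdlt p.toNat).mp hp2
  rw [Int.toNat_of_nonneg (by omega)] at hchar
  obtain ⟨hlt, hnm⟩ := hchar
  have hj1 : p ∈ ([4, 6, 10] : List Int) → 1 ≤ j := by
    intro hmem
    have hp4 : (4 : Int) ≤ p := by fin_cases hmem <;> norm_num
    have h5 : 5 ≤ n.toNat := by omega
    have hs2 : 2 ≤ Nat.sqrt n.toNat := Nat.le_sqrt.mpr (by omega)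
    omega
  refine ⟨fun h4 => ?_, fun h6 => ?_, fun h10 => ?_⟩ <;>
    [(have hj := hj1 (by rw [h4]; norm_num)); (have hj := hj1 (by rw [h6]; norm_num));
     (have hj := hj1 (by rw [h10]; norm_num))] <;>
    exact hnm ⟨2, by omega, by omega, by omega, by omega, by omega⟩

-- removing the first occurrence of na[i] is removing index i, on a duplicate-free list
theorem pvRemoveIdx (na : List Int) (i : Nat) (h : i < na.length) (hd : na.Nodup) :
    (PySem.List.remove? na na[i]).getD na = na.eraseIdx i := by
  have hidx : List.idxOf? na[i] na = some i := by
    rw [List.idxOf?_eq_some_iff]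
    refine ⟨h, rfl, ?_⟩
    intro j hj heq
    have := (List.Nodup.getElem_inj_iff hd).mp heq
    omega
  simp [PySem.List.remove?, hidx]

-- skip-removal as a structural function: after a removal the element sliding into the
-- freed slot is not examined
def pvSkipF (f : Int → Bool) : List Int → List Int
  | [] => []
  | [x] => if f x then [] else [x]
  | x :: y :: ys => if f x then y :: pvSkipF f ys else x :: pvSkipF f (y :: ys)

theorem pvSkipF_cons_neg (f : Int → Bool) (x : Int) (xs : List Int) (hc : ¬ f x = true) :
    pvSkipF f (x :: xs) = x :: pvSkipF f xs := by
  cases xs <;> simp [pvSkipF, hc]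

-- A's index loop computes exactly the skip-removal on the suffix
theorem pvRemoveLoopSkip (m p : Int) : ∀ (na : List Int) (i : Nat), na.Nodup →
    aRemoveLoop m p na i
      = na.take i ++ pvSkipF (fun k => PySem.Int.mod (m + k) p == 0) (na.drop i) := by
  intro na i
  induction na, i using aRemoveLoop.induct m p with
  | case1 na i h hc ih =>
    intro hd
    rw [aRemoveLoop, dif_pos h, if_pos hc]
    rw [pvRemoveIdx na i h hd] at ih ⊢
    rw [ih ((na.eraseIdx_sublist i).nodup hd)]
    have hlen : (na.take i).length = i := by simp; omega
    rw [List.eraseIdx_eq_take_drop_succ]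
    rw [List.take_append, List.drop_append, hlen]
    rw [List.take_of_length_le (by omega : (na.take i).length ≤ i + 1),
        List.drop_eq_nil_of_le (by omega : (na.take i).length ≤ i + 1)]
    rw [List.drop_eq_getElem_cons h]
    cases hdp : na.drop (i + 1) with
    | nil => simp [pvSkipF, hc, hdp]
    | cons y ys => simp [pvSkipF, hc, hdp]
  | case2 na i h hc ih =>
    intro hd
    rw [aRemoveLoop, dif_pos h, if_neg hc]
    rw [ih hd]
    conv_rhs => rw [List.drop_eq_getElem_cons h,
      pvSkipF_cons_neg (fun k => PySem.Int.mod (m + k) p == 0) na[i] _ hc]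
    rw [List.take_succ_eq_append_getElem h, List.append_assoc, List.singleton_append]
  | case3 na i h =>
    intro hd
    rw [aRemoveLoop, dif_neg h]
    simp [List.drop_eq_nil_of_le (by omega : na.length ≤ i), pvSkipF,
      List.take_of_length_le (by omega : na.length ≤ i)]

-- divisibility reading of the kill/hit tests
theorem pvModDvd (x p : Int) :
    (PySem.Int.mod x p == 0) = decide (p ∣ x) := by
  rw [Bool.eq_iff_iff]
  simp [PySem.Int.mod_eq_zero_iff_dvd]

-- A's modulus chain collapses: ((n%p)^2 % p + k) % p = (n*n + k) % p
theorem pvModAdd (n p k : Int) (hp : 0 < p) :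
    PySem.Int.mod (PySem.Int.mod ((PySem.Int.mod n p) ^ 2) p + k) p
      = PySem.Int.mod (n * n + k) p := by
  rw [PySem.Int.mod_eq_emod_of_pos hp, PySem.Int.mod_eq_emod_of_pos hp,
      PySem.Int.mod_eq_emod_of_pos hp, PySem.Int.mod_eq_emod_of_pos hp]
  conv_lhs => rw [sq, ← Int.mul_emod]
  conv_rhs => rw [Int.add_emod]
  conv_lhs => rw [Int.add_emod]
  simp [Int.emod_emod_of_dvd]

-- kill test of B
def pvKill (n p k : Int) : Bool := PySem.Int.mod (n * n + k) p == 0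
def pvHit (n p : Int) : Bool := bSteps.any (fun s => PySem.Int.mod (n * n + s) p == 0)

theorem pvKillDvd (n p k : Int) : pvKill n p k = true ↔ p ∣ (n * n + k) := by
  unfold pvKill
  rw [pvModDvd]
  simp

-- the square of a nonmultiple of 3 is 1 mod 3
theorem pvSq3 (n : Int) (h : ¬ (3 : Int) ∣ n) : n * n % 3 = 1 := by
  have h1 : n % 3 = 1 ∨ n % 3 = 2 := by omega
  have h2 := Int.mul_emod n n 3
  rcases h1 with h1 | h1 <;> rw [h1] at h2 <;> omega

-- at p = 2 and p = 3 no element of {15,21,25} is ever killed for an even n not divisible by 3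
theorem pvSmallNoKill (n p : Int) (h2 : (2 : Int) ∣ n) (h3 : ¬ (3 : Int) ∣ n)
    (hp : p = 2 ∨ p = 3) : ∀ k ∈ ([15, 21, 25] : List Int), pvKill n p k = false := by
  intro k hk
  rw [Bool.eq_false_iff, Ne, pvKillDvd]
  have hsq3 := pvSq3 n h3
  have hsq2 : (2 : Int) ∣ n * n := h2.mul_right n
  generalize hx : n * n = x at hsq3 hsq2 ⊢
  fin_cases hk <;> rcases hp with rfl | rfl <;> omega

-- no admissible prime kills both 15 and 21 (it would divide 6)
theorem pvNo1521 (n p : Int) (h2 : (2 : Int) ∣ n) (h3 : ¬ (3 : Int) ∣ n)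
    (hp2 : 2 ≤ p) (hp6 : p ≠ 6) : ¬ (pvKill n p 15 = true ∧ pvKill n p 21 = true) := by
  rintro ⟨ha, hb⟩
  rw [pvKillDvd] at ha hb
  have h6 : p ∣ 6 := by
    have := dvd_sub hb ha
    simpa using this
  have hle : p ≤ 6 := Int.le_of_dvd (by norm_num) h6
  have hsq3 := pvSq3 n h3
  have hsq2 : (2 : Int) ∣ n * n := h2.mul_right n
  generalize hx : n * n = x at ha hb hsq3 hsq2
  interval_cases p <;> omega

-- no admissible prime kills both 21 and 25 (it would divide 4)
theorem pvNo2125 (n p : Int) (h2 : (2 : Int) ∣ n) (h3 : ¬ (3 : Int) ∣ n)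
    (hp2 : 2 ≤ p) (hp4 : p ≠ 4) : ¬ (pvKill n p 21 = true ∧ pvKill n p 25 = true) := by
  rintro ⟨ha, hb⟩
  rw [pvKillDvd] at ha hb
  have h4 : p ∣ 4 := by
    have := dvd_sub hb ha
    simpa using this
  have hle : p ≤ 4 := Int.le_of_dvd (by norm_num) h4
  have hsq3 := pvSq3 n h3
  have hsq2 : (2 : Int) ∣ n * n := h2.mul_right n
  generalize hx : n * n = x at ha hb hsq3 hsq2
  interval_cases p <;> omega

-- beyond 5 no admissible prime kills both 15 and 25 (it would divide 10)
theorem pvNo1525 (n p : Int) (hp5 : 5 < p) (hp10 : p ≠ 10) :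
    ¬ (pvKill n p 15 = true ∧ pvKill n p 25 = true) := by
  rintro ⟨ha, hb⟩
  rw [pvKillDvd] at ha hb
  have h10 : p ∣ 10 := by
    have := dvd_sub hb ha
    simpa using this
  have hle : p ≤ 10 := Int.le_of_dvd (by norm_num) h10
  interval_cases p <;> omega

-- skip-removal agrees with plain filtering on the reachable states
theorem pvSkipEqFilter (n p : Int) (h2 : (2 : Int) ∣ n) (h3 : ¬ (3 : Int) ∣ n)
    (hp2 : 2 ≤ p) (hp4 : p ≠ 4) (hp6 : p ≠ 6) (hp10 : p ≠ 10)
    (na : List Int) (hsub : na.Sublist [15, 21, 25])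
    (hinv : na = [15, 21, 25] ∨ 5 < p) :
    pvSkipF (pvKill n p) na = na.filter (fun k => !pvKill n p k) := by
  have hcases : na = [] ∨ na = [15] ∨ na = [21] ∨ na = [25] ∨ na = [15, 21] ∨ na = [15, 25]
      ∨ na = [21, 25] ∨ na = [15, 21, 25] := by
    have h := List.mem_sublists.mpr hsub
    simp [List.sublists] at h
    tauto
  have h1521 := pvNo1521 n p h2 h3 hp2 hp6
  have h2125 := pvNo2125 n p h2 h3 hp2 hp4
  have h1525 : 5 < p → ¬ (pvKill n p 15 = true ∧ pvKill n p 25 = true) :=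
    fun h5 => pvNo1525 n p h5 hp10
  rcases hcases with rfl | rfl | rfl | rfl | rfl | rfl | rfl | rfl <;>
    by_cases k15 : pvKill n p 15 <;> by_cases k21 : pvKill n p 21 <;>
    by_cases k25 : pvKill n p 25 <;>
    (simp_all [pvSkipF, List.filter]) <;> omega

-- the filter-semantics scan (proof-side abstraction of B)
def pvGPat (n : Int) : List Int → List Int → Option Bool
  | [], _ => none
  | p :: ps, na =>
    if p > n + 2 then some (decide (na.length = 0))
    else if pvHit n p then some false
    else pvGPat n ps (na.filter (fun k => !pvKill n p k))

-- A's stateful scan equals the filter-semantics scan on admissible prime lists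
theorem pvAeqG (n : Int) (h2 : (2 : Int) ∣ n) (h3 : ¬ (3 : Int) ∣ n) :
    ∀ (ps : List Int), ps.Pairwise (· < ·) →
      (∀ q ∈ ps, 2 ≤ q ∧ q ≠ 4 ∧ q ≠ 6 ∧ q ≠ 10) →
      ∀ (na : List Int), na.Sublist [15, 21, 25] →
      (na = [15, 21, 25] ∨ ∀ q ∈ ps, 5 < q) →
      aPatGo n bSteps ps na = pvGPat n ps na := by
  intro ps
  induction ps with
  | nil => intro _ _ na _ _; rfl
  | cons p ps ih =>
    intro hpw hq na hsub hinv
    obtain ⟨hp2, hp4, hp6, hp10⟩ := hq p (List.mem_cons_self)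
    by_cases hgt : p > n + 2
    · simp [aPatGo, pvGPat, hgt]
    · have hhitEq : (bSteps.any (fun s =>
          PySem.Int.mod (PySem.Int.mod ((PySem.Int.mod n p) ^ 2) p + s) p == 0)) = pvHit n p := by
        unfold pvHit
        congr 1
        funext s
        rw [pvModAdd n p s (by omega)]
      have hnd : na.Nodup := hsub.nodup (by decide)
      have hfEq : (fun k => PySem.Int.mod (PySem.Int.mod ((PySem.Int.mod n p) ^ 2) p + k) p == 0)
          = pvKill n p := by
        funext k
        rw [pvModAdd n p k (by omega)]
        rfl
      by_cases hhit : pvHit n p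
      · simp only [aPatGo, pvGPat, if_neg hgt]
        rw [hhitEq, if_pos hhit, if_pos hhit]
      · simp only [aPatGo, pvGPat, if_neg hgt]
        rw [hhitEq, if_neg hhit, if_neg hhit]
        rw [pvRemoveLoopSkip _ _ na 0 hnd]
        simp only [List.take_zero, List.drop_zero, List.nil_append]
        rw [hfEq]
        have hinv' : na = [15, 21, 25] ∨ 5 < p := by
          rcases hinv with hfull | hbig
          · exact Or.inl hfull
          · exact Or.inr (hbig p (List.mem_cons_self))
        rw [pvSkipEqFilter n p h2 h3 hp2 hp4 hp6 hp10 na hsub hinv']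
        apply ih (List.Pairwise.of_cons hpw) (fun q hq' => hq q (List.mem_cons_of_mem _ hq'))
          _ (List.Sublist.trans List.filter_sublist hsub)
        rcases hinv with hfull | hbig
        · by_cases heq : na.filter (fun k => !pvKill n p k) = [15, 21, 25]
          · exact Or.inl heq
          · right
            intro q hq'
            have hpq : p < q := (List.pairwise_cons.mp hpw).1 q hq'
            have hp23 : ¬ (p = 2 ∨ p = 3) := by
              intro hp'
              apply heq
              rw [hfull]
              refine List.filter_eq_self.mpr ?_
              intro k hk
              simp [pvSmallNoKill n p h2 h3 hp' k hk]
            have hne2 : p ≠ 2 ∧ p ≠ 3 := by tauto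
            omega
        · exact Or.inr (fun q hq' => hbig q (List.mem_cons_of_mem _ hq'))

-- truthiness of the filter-semantics scan as a closed formula over the takeWhile prefix
theorem pvGForm (n : Int) : ∀ (ps na : List Int),
    pyTruthy (pvGPat n ps na)
      = (decide ((ps.takeWhile (fun p => decide (p ≤ n + 2))).length < ps.length)
          && !((ps.takeWhile (fun p => decide (p ≤ n + 2))).any (fun p => pvHit n p))
          && na.all (fun k =>
              (ps.takeWhile (fun p => decide (p ≤ n + 2))).any (fun p => pvKill n p k))) := by
  intro ps
  induction ps with
  | nil => intro na; simp [pvGPat, pyTruthy]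
  | cons p ps ih =>
    intro na
    by_cases hle : p ≤ n + 2
    · have htw : (p :: ps).takeWhile (fun q => decide (q ≤ n + 2))
          = p :: ps.takeWhile (fun q => decide (q ≤ n + 2)) := by simp [hle]
      rw [htw]
      have hgt : ¬ p > n + 2 := by omega
      by_cases hhit : pvHit n p
      · simp [pvGPat, hgt, hhit, pyTruthy]
      · rw [show pvGPat n (p :: ps) na = pvGPat n ps (na.filter (fun k => !pvKill n p k)) from
          by simp [pvGPat, hgt, hhit]]
        rw [ih]
        simp [List.all_filter, hhit, Nat.succ_lt_succ_iff]
    · have htw : (p :: ps).takeWhile (fun q => decide (q ≤ n + 2)) = [] := by simp [hle]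
      have hgt : p > n + 2 := by omega
      rw [htw]
      simp only [pvGPat, if_pos hgt, pyTruthy]
      cases na <;> simp

-- the while loop of _passes computes the takeWhile prefix length, or none on a steps hit
theorem pvBScanEq (n : Int) : ∀ (primes : List Int) (i : Nat),
    bScan n primes i
      = (if ((primes.drop i).takeWhile (fun p => decide (p ≤ n + 2))).any (fun p => pvHit n p)
         then none
         else some (i + ((primes.drop i).takeWhile (fun p => decide (p ≤ n + 2))).length)) := by
  intro primes i
  induction i using bScan.induct n primes with
  | case1 i h hle hhit =>
    rw [bScan, dif_pos h, if_pos hle, if_pos hhit]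
    rw [List.drop_eq_getElem_cons h]
    have hhit' : pvHit n primes[i] = true := hhit
    rw [List.takeWhile_cons, decide_eq_true hle, if_pos rfl, List.any_cons, hhit',
      Bool.true_or, if_pos rfl]
  | case2 i h hle hhit ih =>
    rw [bScan, dif_pos h, if_pos hle, if_neg hhit]
    rw [ih]
    rw [List.drop_eq_getElem_cons h]
    have hhit' : pvHit n primes[i] = false := Bool.eq_false_iff.mpr hhit
    simp only [List.takeWhile_cons, decide_eq_true hle, if_pos, List.any_cons, hhit',
      Bool.false_or, List.length_cons]
    split
    · rfl
    · congr 1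
      omega
  | case3 i h hle =>
    rw [bScan, dif_pos h, if_neg hle]
    rw [List.drop_eq_getElem_cons h]
    rw [List.takeWhile_cons, decide_eq_false hle]
    simp
  | case4 i h =>
    rw [bScan, dif_neg h]
    rw [List.drop_eq_nil_of_le (by omega)]
    simp

-- bPasses through the takeWhile prefix: it is the closed formula of pvGForm
theorem pvBPassesForm (n : Int) (primes : List Int) :
    bPasses n primes
      = (decide ((primes.takeWhile (fun p => decide (p ≤ n + 2))).length < primes.length)
          && !((primes.takeWhile (fun p => decide (p ≤ n + 2))).any (fun p => pvHit n p))
          && ([15, 21, 25] : List Int).all (fun k =>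
              (primes.takeWhile (fun p => decide (p ≤ n + 2))).any (fun p => pvKill n p k))) := by
  unfold bPasses
  rw [pvBScanEq n primes 0]
  simp only [List.drop_zero, Nat.zero_add]
  have htle : (primes.takeWhile (fun p => decide (p ≤ n + 2))).length ≤ primes.length :=
    (List.takeWhile_prefix _).length_le
  by_cases hany : (primes.takeWhile (fun p => decide (p ≤ n + 2))).any (fun p => pvHit n p)
  · rw [if_pos hany]
    simp [hany]
  · rw [if_neg hany]
    have hslice : PySem.List.slice primes (some 0)
        (some (((primes.takeWhile (fun p => decide (p ≤ n + 2))).length : Nat) : Int))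
        = primes.takeWhile (fun p => decide (p ≤ n + 2)) := by
      rw [PySem.List.slice_zero_start, PySem.List.slice_to _ (by positivity)]
      rw [Int.toNat_natCast]
      exact ((List.prefix_iff_eq_take).mp (List.takeWhile_prefix _)).symm
    by_cases hlen : (primes.takeWhile (fun p => decide (p ≤ n + 2))).length = primes.length
    · simp [hlen]
    · have hlt : (primes.takeWhile (fun p => decide (p ≤ n + 2))).length < primes.length := by
        omega
      simp only [beq_iff_eq, if_neg hlen, decide_eq_true hlt, Bool.true_and,
        Bool.not_eq_true] at *
      rw [hslice]
      simp [hany, pvKill]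

-- the accumulator loops of A are sums over filtered ranges
theorem pvFoldSum (l : List Int) (f : Int → Bool) (a : Int) :
    l.foldl (fun acc x => if f x then acc + x else acc) a = a + (l.filter f).sum := by
  induction l generalizing a with
  | nil => simp
  | cons x l ih =>
    by_cases hx : f x <;> simp [hx, ih, add_assoc]

-- candidates of the four progressions are even and not divisible by 3
theorem pvCandRes (s maxi x : Int) (hs : s = 4 ∨ s = 10 ∨ s = 32 ∨ s = 38)
    (hx : x ∈ PySem.List.pyRange s maxi 42) : (2 : Int) ∣ x ∧ ¬ (3 : Int) ∣ x := by
  obtain ⟨h1, h2, h3⟩ := (PySem.List.mem_pyRange_iff_of_pos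
    (show (0 : Int) < 42 by norm_num) x).mp hx
  rcases hs with rfl | rfl | rfl | rfl <;> omega

-- per candidate: A's truthiness equals B's stateless test
theorem pvPatEqPasses (maxi n : Int) (h2 : (2 : Int) ∣ n) (h3 : ¬ (3 : Int) ∣ n) :
    pyTruthy (prime_pattern n (bPrimesBelow maxi) [1, 3, 7, 9, 13, 27])
      = bPasses n (bPrimesBelow maxi) := by
  unfold prime_pattern
  rw [show ([1, 3, 7, 9, 13, 27] : List Int) = bSteps from rfl]
  rw [pvAeqG n h2 h3 (bPrimesBelow maxi) (pvPrimesSorted maxi)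
      (fun q hq => ⟨pvPrimesGe2 maxi q hq, pvPrimesNotBad maxi q hq⟩)
      [15, 21, 25] (List.Sublist.refl _) (Or.inl rfl)]
  rw [pvGForm]
  rw [pvBPassesForm n _]

-- ===== VERDICT (by name: the statement is the Claim_ definition above) =====
theorem such_integers_spec : Claim_equal_such_integers := by
  intro maxi hdom hpre
  unfold Spec_such_integers such_integers such_integers_alt
  dsimp only []
  rw [pvPrimesEq maxi hpre]
  rw [pvFoldSum, pvFoldSum, pvFoldSum, pvFoldSum]
  simp only [List.flatMap_cons, List.flatMap_nil, List.append_nil, List.filter_append,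
    List.sum_append]
  rw [List.filter_congr (fun x hx => pvPatEqPasses maxi x (pvCandRes 4 maxi x (by tauto) hx).1
        (pvCandRes 4 maxi x (by tauto) hx).2),
      List.filter_congr (fun x hx => pvPatEqPasses maxi x (pvCandRes 10 maxi x (by tauto) hx).1
        (pvCandRes 10 maxi x (by tauto) hx).2),
      List.filter_congr (fun x hx => pvPatEqPasses maxi x (pvCandRes 32 maxi x (by tauto) hx).1
        (pvCandRes 32 maxi x (by tauto) hx).2),
      List.filter_congr (fun x hx => pvPatEqPasses maxi x (pvCandRes 38 maxi x (by tauto) hx).1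
        (pvCandRes 38 maxi x (by tauto) hx).2)]
  ring
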